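-- pv_equiv track=rewrite | github.com/sahasarbhanucse2025-spec/python-college-week | week.4/w4.py | generate_series
-- ===== SOURCE A (Python) =====
-- def generate_series(N):
--     series = []
--
--     # First 5 terms are powers of 2
--     for i in range(min(N, 5)):
--         series.append(2**i)
--
--     # Remaining terms follow custom increments
--     increments = [7, 5, 10, 11]  # can extend if needed
--     idx = 0
--     while len(series) < N:
--         next_val = series[-1] + increments[idx % len(increments)]
--         series.append(next_val)
--         idx += 1
--
--     return series
-- ===== SOURCE B (Python) =====
-- def generate_series(N):
--     cyc = [7, 5, 10, 11]
--     out = []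
--     for i in range(N):
--         if i < 5:
--             out.append(2 ** i)
--         else:
--             n = i - 4
--             out.append(16 + (n // 4) * 33 + sum(cyc[:n % 4]))
--     return out
-- ===== Notes on version B (the rewrite author's own statement) =====
-- stated objective: alternative
-- what changed: Replaces A's running-sum accumulation (each term = previous term + cyclic increment) with a single comprehension-style loop that computes every term independently by a closed-form index formula (powers of 2 for i<5, else 16 + 33*(full cycles) + partial cycle sum).
import Mathlib
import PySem

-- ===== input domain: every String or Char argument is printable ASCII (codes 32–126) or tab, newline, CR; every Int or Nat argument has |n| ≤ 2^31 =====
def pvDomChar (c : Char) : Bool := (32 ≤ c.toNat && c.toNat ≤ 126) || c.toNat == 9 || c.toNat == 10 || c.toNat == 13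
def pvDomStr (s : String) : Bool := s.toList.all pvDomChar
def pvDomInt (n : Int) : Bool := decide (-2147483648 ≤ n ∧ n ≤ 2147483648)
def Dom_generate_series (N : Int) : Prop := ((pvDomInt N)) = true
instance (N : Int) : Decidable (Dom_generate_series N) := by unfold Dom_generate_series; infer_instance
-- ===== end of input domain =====

-- B computes each term by a closed-form index formula instead of A's running-sum accumulation; objective: alternative decomposition.

-- ===== PORT A =====
-- while len(series) < N: append series[-1] + increments[idx % 4]; idx += 1
def generate_series_loop (N : Int) (series : List Int) (idx : Int) : List Int :=
  if h : (series.length : Int) < N then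
    let next_val := (PySem.List.pyGet? series (-1)).getD 0 +
      (PySem.List.pyGet? [7, 5, 10, 11] (PySem.Int.mod idx 4)).getD 0
    generate_series_loop N (series ++ [next_val]) (idx + 1)
  else series
termination_by (N - series.length).toNat
decreasing_by simp; omega

def generate_series (N : Int) : List Int :=
  let series := (PySem.List.pyRange 0 (min N 5) 1).map (fun i => 2 ^ i.toNat)
  generate_series_loop N series 0

-- ===== PORT B =====
def generate_series_alt (N : Int) : List Int :=
  (PySem.List.pyRange 0 N 1).map (fun i =>
    if i < 5 then 2 ^ i.toNat
    else
      let n := i - 4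
      16 + (PySem.Int.floordiv n 4) * 33 +
        (PySem.List.slice [7, 5, 10, 11] none (some (PySem.Int.mod n 4))).foldl (· + ·) 0)

-- ===== PRECONDITION & SPEC =====
def Spec_generate_series (N : Int) (out : List Int) : Prop := out = generate_series_alt N
instance (N : Int) (out : List Int) : Decidable (Spec_generate_series N out) := by unfold Spec_generate_series; infer_instance

-- ===== CLAIM (what is proved, stated in full; the proofs are below) =====
def Claim_equal_generate_series : Prop := ∀ (N : Int), Dom_generate_series N → Spec_generate_series N (generate_series N)

-- ===== LEMMAS AND PROOFS =====

-- reference term function (Nat index)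
def gref (i : Nat) : Int :=
  if i < 5 then 2 ^ i
  else 16 + ((i - 4 : Nat) / 4 : Nat) * 33 + [0, 7, 12, 22].getD ((i - 4) % 4) 0

theorem gref_step (L : Nat) (h5 : 5 ≤ L) :
    gref L = gref (L - 1) + [(7:Int), 5, 10, 11].getD ((L - 5) % 4) 0 := by
  obtain ⟨k, rfl⟩ : ∃ k, L = 5 + k := ⟨L - 5, by omega⟩
  unfold gref
  match k with
  | 0 => decide
  | (m + 1) =>
    simp only [show ¬ (5 + (m + 1) < 5) by omega, show ¬ (5 + (m + 1) - 1 < 5) by omega,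
      show 5 + (m + 1) - 4 = m + 2 by omega, show 5 + (m + 1) - 1 - 4 = m + 1 by omega,
      show 5 + (m + 1) - 5 = m + 1 by omega, if_false]
    have hr : (m + 1) % 4 = 0 ∨ (m + 1) % 4 = 1 ∨ (m + 1) % 4 = 2 ∨ (m + 1) % 4 = 3 := by omega
    rcases hr with hr | hr | hr | hr <;>
      rw [hr, show (m + 2) % 4 = ((m + 1) % 4 + 1) % 4 by omega, hr] <;>
      simp [List.getD] <;> omega

theorem altB_eq (N : Int) : generate_series_alt N = (List.range N.toNat).map gref := by
  unfold generate_series_alt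
  rw [PySem.List.pyRange_one]
  simp only [sub_zero, List.map_map]
  apply List.map_congr_left
  intro k hk
  simp only [Function.comp_apply, zero_add, gref]
  by_cases h5 : k < 5
  · rw [if_pos (by exact_mod_cast h5), if_pos h5]
    simp
  · rw [if_neg (by exact_mod_cast h5), if_neg h5]
    have h4 : (k : Int) - 4 = ((k - 4 : Nat) : Int) := by omega
    have hf : PySem.Int.floordiv ((k - 4 : Nat) : Int) 4 = (((k - 4) / 4 : Nat) : Int) := by
      exact_mod_cast PySem.Int.floordiv_natCast (k - 4) 4
    have hm : PySem.Int.mod ((k - 4 : Nat) : Int) 4 = (((k - 4) % 4 : Nat) : Int) := by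
      exact_mod_cast PySem.Int.mod_natCast (k - 4) 4
    rw [h4, hf, hm, PySem.List.slice_to_natCast]
    have hr : (k - 4) % 4 = 0 ∨ (k - 4) % 4 = 1 ∨ (k - 4) % 4 = 2 ∨ (k - 4) % 4 = 3 := by omega
    rcases hr with hr | hr | hr | hr <;> rw [hr] <;> simp [List.getD]

theorem loop_inv (N : Int) (L : Nat) (h5 : 5 ≤ L) (hL : (L : Int) ≤ N) :
    generate_series_loop N ((List.range L).map gref) ((L : Int) - 5)
      = (List.range N.toNat).map gref := by
  have hfuel : (N - L).toNat = N.toNat - L := by omega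
  obtain ⟨f, hf⟩ : ∃ f, f = N.toNat - L := ⟨_, rfl⟩
  induction f generalizing L with
  | zero =>
    rw [generate_series_loop]
    have hnlt : ¬ ((((List.range L).map gref).length : Int) < N) := by
      simp only [List.length_map, List.length_range]; omega
    rw [dif_neg hnlt]
    have : L = N.toNat := by omega
    rw [this]
  | succ f ih =>
    rw [generate_series_loop]
    have hlt : ((((List.range L).map gref).length : Int) < N) := by
      simp only [List.length_map, List.length_range]; omega
    rw [dif_pos hlt]
    have hstep : ((PySem.List.pyGet? ((List.range L).map gref) (-1)).getD 0 +
        (PySem.List.pyGet? [7, 5, 10, 11] (PySem.Int.mod ((L : Int) - 5) 4)).getD 0) = gref L := by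
      obtain ⟨m, rfl⟩ : ∃ m, L = m + 1 := ⟨L - 1, by omega⟩
      rw [show List.range (m + 1) = List.range m ++ [m] from List.range_succ, List.map_append]
      simp only [List.map_cons, List.map_nil]
      rw [PySem.List.pyGet?_neg_one_append_singleton]
      have h5' : ((m + 1 : Nat) : Int) - 5 = ((m + 1 - 5 : Nat) : Int) := by push_cast; omega
      have hm : PySem.Int.mod ((m + 1 - 5 : Nat) : Int) 4 = (((m + 1 - 5) % 4 : Nat) : Int) := by
        exact_mod_cast PySem.Int.mod_natCast (m + 1 - 5) 4
      rw [h5', hm, PySem.List.pyGet?_natCast]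
      rw [gref_step (m + 1) h5]
      have hr : (m + 1 - 5) % 4 = 0 ∨ (m + 1 - 5) % 4 = 1 ∨ (m + 1 - 5) % 4 = 2 ∨
          (m + 1 - 5) % 4 = 3 := by omega
      rcases hr with hr | hr | hr | hr <;> rw [hr] <;> simp [List.getD]
    show generate_series_loop N ((List.range L).map gref ++
      [(PySem.List.pyGet? ((List.range L).map gref) (-1)).getD 0 +
        (PySem.List.pyGet? [7, 5, 10, 11] (PySem.Int.mod ((L : Int) - 5) 4)).getD 0])
      ((L : Int) - 5 + 1) = (List.range N.toNat).map gref
    rw [hstep]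
    have harr : (List.range L).map gref ++ [gref L] = (List.range (L + 1)).map gref := by
      rw [show List.range (L + 1) = List.range L ++ [L] from List.range_succ, List.map_append]
      rfl
    have hidx : (L : Int) - 5 + 1 = ((L + 1 : Nat) : Int) - 5 := by omega
    rw [harr, hidx]
    exact ih (L + 1) (by omega) (by omega) (by omega) (by omega)

theorem init_eq (M : Int) (hM : M ≤ 5) :
    (PySem.List.pyRange 0 M 1).map (fun i => (2 : Int) ^ i.toNat)
      = (List.range M.toNat).map gref := by
  rw [PySem.List.pyRange_one]
  simp only [sub_zero, List.map_map]
  apply List.map_congr_left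
  intro k hk
  simp only [List.mem_range] at hk
  have hk5 : k < 5 := by omega
  simp [Function.comp_apply, gref, hk5]

theorem portA_eq (N : Int) : generate_series N = (List.range N.toNat).map gref := by
  unfold generate_series
  by_cases h : N ≤ 5
  · rw [show min N 5 = N from min_eq_left h, init_eq N h]
    rw [generate_series_loop]
    have hnlt : ¬ ((((List.range N.toNat).map gref).length : Int) < N) := by
      simp only [List.length_map, List.length_range]; omega
    rw [dif_neg hnlt]
  · rw [show min N 5 = 5 from min_eq_right (by omega), init_eq 5 (by omega)]
    have := loop_inv N 5 (by omega) (by omega)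
    simpa using this

-- ===== VERDICT (by name: the statement is the Claim_ definition above) =====
theorem generate_series_spec : Claim_equal_generate_series := by
  intro N _
  unfold Spec_generate_series
  rw [portA_eq, altB_eq]
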